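-- pv_equiv track=rewrite | github.com/DidierLeBail/Temporal-networks-PhD-code | flows/test_GOL_and_CIE.py | Iter_string2
-- ===== SOURCE A (Python) =====
-- def Find_domains(string):
-- 	digit_to_letter = {-1:'-',1:'+'}
-- 	domains = []; letter = string[0]; start = 0; end = 0
-- 	if letter=='-':
-- 		sign = -1
-- 	elif letter=='+':
-- 		sign = 1
-- 	while end<len(string):
-- 		if string[end]==letter:
-- 			end += 1
-- 		else:
-- 			domains.append((start,end-1,sign))
-- 			start = end; sign *= -1
-- 			letter = digit_to_letter[sign]
-- 	domains.append((start,end-1,sign))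
-- 	return domains
--
-- def Get_dev(Y,domain):
-- 	res = []
-- 	len_dom = domain[1]-domain[0]+1
-- 	for i in range(len_dom):
-- 		ind = domain[0]+i
-- 		if (Y[ind+1]-Y[ind])*domain[2]<0:
-- 			res.append(abs(Y[ind+1]-Y[ind]))
-- 	return res
--
-- def Iter_string2(Y,first_string):
-- 	string = list(first_string)
-- 	#collect the motif domain '---+++---' (up) or '+++---+++' (down) and try to absorb the central droplet
-- 	#begin by the smallest droplets
-- 	domains = Find_domains(first_string)
-- 	nb_dom = len(domains)
-- 	#we identify a motif by the position of the droplet into the list of domains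
-- 	motifs = []
-- 	for ind in range(1,nb_dom-1):
-- 		motifs.append((ind,domains[ind][2]))
-- 	#sort the motifs by increasing droplet size
-- 	motifs.sort(key=lambda el:domains[el[0]][1]-domains[el[0]][0]+1)
-- 	#we collect all the accepted deviations to deduce an acceptance criterion for a new deviation
-- 	list_dev = []
-- 	for domain in domains:
-- 		list_dev += Get_dev(Y,domain)
-- 	dev_max = max(list_dev)
-- 	#try to absorb the smallest droplet, if not, try to absorb the next smallest droplet, etc.
-- 	num = 0
-- 	while num<len(motifs):
-- 		motif = motifs[num]; sign = motif[1]
-- 		#acceptance criterion: the new deviations are less than the maximum already accepted ones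
-- 		merged_domain = (domains[motif[0]-1][0],domains[motif[0]+1][1],-sign)
-- 		new_list_dev = Get_dev(Y,merged_domain)
-- 		new_max = max(new_list_dev)
-- 		if new_max<=dev_max:
-- 			#absorb the droplet
-- 			if sign<0:
-- 				new_letter = '+'
-- 			elif sign>0:
-- 				new_letter = '-'
-- 			for ind in range(domains[motif[0]][0],domains[motif[0]][1]+1):
-- 				string[ind] = new_letter
-- 			num = len(motifs)
-- 		else:
-- 			num += 1
-- 	return ''.join(string)
-- ===== SOURCE B (Python) =====
-- def Iter_string2(Y, first_string):
--     s = first_string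
--     n = len(s)
--     sgn = {'+': 1, '-': -1}
--     # sign runs by a two-pointer scan
--     runs = []
--     i = 0
--     while i < n:
--         j = i
--         while j + 1 < n and s[j + 1] == s[i]:
--             j += 1
--         runs.append((i, j))
--         i = j + 1
--     # maximum accepted deviation, one pass over all positions
--     dev_max = max(abs(Y[k + 1] - Y[k]) for k in range(n)
--                   if (Y[k + 1] - Y[k]) * sgn[s[k]] < 0)
--     # no sorting: test EVERY interior run once and keep the accepted one
--     # with the lexicographically least (size, index) key
--     best = None
--     for r in range(1, len(runs) - 1):
--         p, q = runs[r]
--         t = sgn[s[p - 1]]  # sign of the merged domain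
--         new_max = max(abs(Y[k + 1] - Y[k])
--                       for k in range(runs[r - 1][0], runs[r + 1][1] + 1)
--                       if (Y[k + 1] - Y[k]) * t < 0)
--         if new_max <= dev_max:
--             key = (q - p, r)
--             if best is None or key < best[0]:
--                 best = (key, p, q)
--     if best is None:
--         return first_string
--     _, p, q = best
--     flip = '+' if s[p] == '-' else '-'
--     return s[:p] + flip * (q - p + 1) + s[q + 1:]
-- ===== Notes on version B (the rewrite author's own statement) =====
-- stated objective: alternative
-- what changed: B eliminates A's sort-then-try-in-order control flow entirely: it extracts sign runs with a two-pointer scan (instead of A's letter/sign state machine), computes dev_max and each merged-domain maximum in single direct scans (instead of concatenating per-domain Get_dev lists), and instead of stably sorting the interior droplets by size and absorbing the first acceptable one it evaluates the acceptance test once for EVERY interior run in a single left-to-right pass and flips the accepted run with the lexicographically least (size, index) key, rebuilding the string by slicing rather than …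
-- outside the precondition, e.g. on Iter_string2([3, -5, -3, 0, 4], '-+-+'): A returns '---+', B raises ValueError
import Mathlib
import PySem

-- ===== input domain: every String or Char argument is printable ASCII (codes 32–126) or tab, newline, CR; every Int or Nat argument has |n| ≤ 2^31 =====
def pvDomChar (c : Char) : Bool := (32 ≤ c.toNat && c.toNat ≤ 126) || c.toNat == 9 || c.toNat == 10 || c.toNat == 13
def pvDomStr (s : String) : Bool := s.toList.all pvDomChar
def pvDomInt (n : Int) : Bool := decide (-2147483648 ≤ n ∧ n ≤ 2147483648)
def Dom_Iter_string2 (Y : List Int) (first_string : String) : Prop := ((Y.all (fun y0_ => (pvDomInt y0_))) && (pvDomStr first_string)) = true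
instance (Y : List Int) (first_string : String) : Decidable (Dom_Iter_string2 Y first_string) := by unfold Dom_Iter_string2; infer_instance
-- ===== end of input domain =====

-- B drops A's sort-then-try-in-order control flow: it extracts runs with a two-pointer
-- scan, evaluates the acceptance test once for every interior run in a single pass and
-- flips the accepted run with the least (size, index) key (objective: alternative).

-- ===== PORT A =====
-- Find_domains' while loop; the loop advances `end` or flips `letter`, so it is ported
-- with fuel 2*len+2 (enough for every terminating run; Python diverges on characters
-- outside {'+','-'}, which Pre_ excludes).  An unbound Python variable (sign when
-- string[0] is not '+'/'-') is ported as a junk value, reachable only outside Pre_.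
def pvFindLoop (cs : List Char) (letter : Char) (sign : Int) (start e : Int)
    (domains : List (Int × Int × Int)) : Nat → List (Int × Int × Int)
  | 0 => domains ++ [(start, e - 1, sign)]
  | fuel + 1 =>
    if e < (cs.length : Int) then
      if PySem.List.pyGetD cs e ' ' = letter then
        pvFindLoop cs letter sign start (e + 1) domains fuel
      else
        pvFindLoop cs (if -sign = -1 then '-' else '+') (-sign) e e
          (domains ++ [(start, e - 1, sign)]) fuel
    else domains ++ [(start, e - 1, sign)]

def pvFindDomains (s : String) : List (Int × Int × Int) :=
  let cs := s.toList
  let letter := PySem.List.pyGetD cs 0 ' '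
  let sign : Int := if letter = '-' then -1 else if letter = '+' then 1 else 0
  pvFindLoop cs letter sign 0 0 [] (2 * cs.length + 2)

def pvGetDev (Y : List Int) (dom : Int × Int × Int) : List Int :=
  let lenDom := dom.2.1 - dom.1 + 1
  (PySem.List.pyRange 0 lenDom 1).foldl (fun res i =>
    let d := PySem.List.pyGetD Y (dom.1 + i + 1) 0 - PySem.List.pyGetD Y (dom.1 + i) 0
    if d * dom.2.2 < 0 then res ++ [|d|] else res) []

def pvIterLoop (Y : List Int) (domains : List (Int × Int × Int)) (motifs : List (Int × Int))
    (devMax : Int) (string : List Char) (num : Nat) : List Char :=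
  if h : num < motifs.length then
    let motif := motifs[num]
    let sign := motif.2
    let dPrev := PySem.List.pyGetD domains (motif.1 - 1) (0, 0, 0)
    let dNext := PySem.List.pyGetD domains (motif.1 + 1) (0, 0, 0)
    let newMax := (PySem.List.max? (pvGetDev Y (dPrev.1, dNext.2.1, -sign)) (fun x => x)).getD 0
    if newMax ≤ devMax then
      let newLetter := if sign < 0 then '+' else '-'
      let dCur := PySem.List.pyGetD domains motif.1 (0, 0, 0)
      (PySem.List.pyRange dCur.1 (dCur.2.1 + 1) 1).foldl
        (fun st ind => st.set ind.toNat newLetter) string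
    else
      pvIterLoop Y domains motifs devMax string (num + 1)
  else string
termination_by motifs.length - num

def Iter_string2 (Y : List Int) (first_string : String) : String :=
  let string := first_string.toList
  let domains := pvFindDomains first_string
  let nbDom : Int := (domains.length : Int)
  let motifs := (PySem.List.pyRange 1 (nbDom - 1) 1).foldl
    (fun acc ind => acc ++ [(ind, (PySem.List.pyGetD domains ind (0, 0, 0)).2.2)]) []
  let motifsS := PySem.List.sorted motifs
    (fun el => (PySem.List.pyGetD domains el.1 (0, 0, 0)).2.1
      - (PySem.List.pyGetD domains el.1 (0, 0, 0)).1 + 1) false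
  let listDev := domains.foldl (fun acc d => acc ++ pvGetDev Y d) []
  let devMax := (PySem.List.max? listDev (fun x => x)).getD 0
  String.ofList (pvIterLoop Y domains motifsS devMax string 0)

-- ===== PORT B =====
def pvSgnC (c : Char) : Int := if c = '+' then 1 else if c = '-' then -1 else 0

-- Source B's inner two-pointer loop `while j+1 < n and s[j+1] == s[i]: j += 1` (c = s[i]);
-- j advances at every step, so fuel cs.length is always enough
def pvInnerB (cs : List Char) (c : Char) : Nat → Int → Int
  | 0, j => j
  | fuel + 1, j =>
    if j + 1 < (cs.length : Int) ∧ PySem.List.pyGetD cs (j + 1) ' ' = c then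
      pvInnerB cs c fuel (j + 1)
    else j

-- Source B's outer run-extraction loop; each iteration consumes at least one character,
-- so fuel cs.length + 1 is always enough
def pvRunsB (cs : List Char) : Nat → Int → List (Int × Int)
  | 0, _ => []
  | fuel + 1, i =>
    if i < (cs.length : Int) then
      (i, pvInnerB cs (PySem.List.pyGetD cs i ' ') cs.length i) ::
        pvRunsB cs fuel (pvInnerB cs (PySem.List.pyGetD cs i ' ') cs.length i + 1)
    else []

-- one iteration of Source B's selection loop (state: best = None | ((size,key), p, q))
def pvStepB (Y : List Int) (cs : List Char) (runs : List (Int × Int)) (devMax : Int)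
    (best : Option ((Int × Int) × Int × Int)) (r : Int) : Option ((Int × Int) × Int × Int) :=
  let run := PySem.List.pyGetD runs r (0, 0)
  let t := pvSgnC (PySem.List.pyGetD cs (run.1 - 1) ' ')
  let newMax := (PySem.List.max?
    ((PySem.List.pyRange (PySem.List.pyGetD runs (r - 1) (0, 0)).1
        ((PySem.List.pyGetD runs (r + 1) (0, 0)).2 + 1) 1).foldl (fun acc k =>
      let d := PySem.List.pyGetD Y (k + 1) 0 - PySem.List.pyGetD Y k 0
      if d * t < 0 then acc ++ [|d|] else acc) []) (fun x => x)).getD 0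
  if newMax ≤ devMax then
    match best with
    | none => some ((run.2 - run.1, r), run.1, run.2)
    | some b =>
      if run.2 - run.1 < b.1.1 ∨ (run.2 - run.1 = b.1.1 ∧ r < b.1.2) then
        some ((run.2 - run.1, r), run.1, run.2)
      else some b
  else best

def Iter_string2_alt (Y : List Int) (first_string : String) : String :=
  let cs := first_string.toList
  let n : Int := (cs.length : Int)
  let runs := pvRunsB cs (cs.length + 1) 0
  let devMax := (PySem.List.max? ((PySem.List.pyRange 0 n 1).foldl (fun acc k =>
    let d := PySem.List.pyGetD Y (k + 1) 0 - PySem.List.pyGetD Y k 0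
    if d * pvSgnC (PySem.List.pyGetD cs k ' ') < 0 then acc ++ [|d|] else acc) []) (fun x => x)).getD 0
  let best := (PySem.List.pyRange 1 ((runs.length : Int) - 1) 1).foldl
    (pvStepB Y cs runs devMax) (none : Option ((Int × Int) × Int × Int))
  match best with
  | none => first_string
  | some (_, p, q) =>
    String.ofList (PySem.List.slice cs none (some p) ++
      PySem.List.pyRepeat [if PySem.List.pyGetD cs p ' ' = '-' then '+' else '-'] (q - p + 1) ++
      PySem.List.slice cs (some (q + 1)) none)

-- ===== PRECONDITION & SPEC =====
-- Pre_ excludes exactly the inputs where the Python A raises or diverges: an empty string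
-- (IndexError), characters outside {'+','-'} (NameError/KeyError or non-termination),
-- Y shorter than len(string)+1 (IndexError), no accepted deviation at all (ValueError on
-- max of the empty list), and — conservatively — any input on which SOME interior droplet's
-- merged domain has no opposing deviation (ValueError on max in the selection loop); the last
-- clause also excludes a few inputs on which A returns, because A stops before examining the
-- offending droplet while B examines them all (see the cite in the claim).
-- Bool-valued clauses of Pre_ (kept as separate defs so the Decidable instance composes)
def pvPreDev (Y : List Int) (cs : List Char) : Bool :=
  (List.range cs.length).any fun k =>
    decide ((Y.getD (k + 1) 0 - Y.getD k 0) * pvSgnC (cs.getD k ' ') < 0)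

def pvPreDroplet (Y : List Int) (cs : List Char) : Bool :=
  (List.range cs.length).all fun p =>
  (List.range cs.length).all fun q =>
    !(decide (0 < p) && decide (p ≤ q) && decide (q + 1 < cs.length)
      && decide (cs.getD (p - 1) ' ' ≠ cs.getD p ' ')
      && decide (cs.getD q ' ' ≠ cs.getD (q + 1) ' ')
      && (List.range cs.length).all (fun k =>
            !(decide (p ≤ k) && decide (k ≤ q)) || decide (cs.getD k ' ' = cs.getD p ' '))) ||
    ((List.range cs.length).all fun a =>
     (List.range cs.length).all fun b =>
      !(decide (a ≤ p - 1) && decide (q + 1 ≤ b)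
        && (decide (a = 0) || decide (cs.getD (a - 1) ' ' ≠ cs.getD a ' '))
        && (List.range cs.length).all (fun k =>
              !(decide (a ≤ k) && decide (k < p)) || decide (cs.getD k ' ' = cs.getD (p - 1) ' '))
        && (decide (b = cs.length - 1) || decide (cs.getD b ' ' ≠ cs.getD (b + 1) ' '))
        && (List.range cs.length).all (fun k =>
              !(decide (q + 1 ≤ k) && decide (k ≤ b)) || decide (cs.getD k ' ' = cs.getD (q + 1) ' '))) ||
      (List.range cs.length).any (fun j => decide (a ≤ j) && decide (j ≤ b)
        && decide ((Y.getD (j + 1) 0 - Y.getD j 0) * pvSgnC (cs.getD (p - 1) ' ') < 0)))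

def Pre_Iter_string2 (Y : List Int) (first_string : String) : Prop :=
  first_string.toList ≠ [] ∧
  first_string.toList.all (fun c => c == '+' || c == '-') = true ∧
  first_string.toList.length + 1 ≤ Y.length ∧
  pvPreDev Y first_string.toList = true ∧
  pvPreDroplet Y first_string.toList = true

instance (Y : List Int) (first_string : String) : Decidable (Pre_Iter_string2 Y first_string) := by
  unfold Pre_Iter_string2; infer_instance

def pvWitness_Iter_string2 : List Int × String := ([0, 2, 1, 0], "+-+")

def Spec_Iter_string2 (Y : List Int) (first_string : String) (out : String) : Prop :=
  out = Iter_string2_alt Y first_string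
instance (Y : List Int) (first_string : String) (out : String) :
    Decidable (Spec_Iter_string2 Y first_string out) := by
  unfold Spec_Iter_string2; infer_instance

-- ===== CLAIM (what is proved, stated in full; the proofs are below) =====
def Claim_equal_Iter_string2 : Prop := ∀ (Y : List Int) (first_string : String),
  Dom_Iter_string2 Y first_string → Pre_Iter_string2 Y first_string →
  Spec_Iter_string2 Y first_string (Iter_string2 Y first_string)

-- ===== LEMMAS AND PROOFS =====

-- proof-side helpers -------------------------------------------------------

/-- boundary positions of `cs` from position `e` on, ending with `cs.length` -/
def pvBnd (cs : List Char) (e : Nat) : List Nat :=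
  if h : e < cs.length then
    (if cs.getD e ' ' = cs.getD (e - 1) ' ' then pvBnd cs (e + 1) else e :: pvBnd cs (e + 1))
  else [cs.length]
termination_by cs.length - e

/-- the domain triples generated by a start position and the list of following boundaries -/
def pvPairs (cs : List Char) : Nat → List Nat → List (Int × Int × Int)
  | _, [] => []
  | a, b :: rest => ((a : Int), (b : Int) - 1, pvSgnC (cs.getD a ' ')) :: pvPairs cs b rest

def pvDY (Y : List Int) (k : Nat) : Int := Y.getD (k + 1) 0 - Y.getD k 0

/-- deviations with a constant sign over `l` positions starting at `a` -/
def pvDevC (Y : List Int) (t : Int) : Nat → Nat → List Int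
  | _, 0 => []
  | a, l + 1 => (if pvDY Y a * t < 0 then [|pvDY Y a|] else []) ++ pvDevC Y t (a + 1) l

/-- deviations with the per-position character sign over `l` positions starting at `a` -/
def pvDevV (Y : List Int) (cs : List Char) : Nat → Nat → List Int
  | _, 0 => []
  | a, l + 1 =>
    (if pvDY Y a * pvSgnC (cs.getD a ' ') < 0 then [|pvDY Y a|] else []) ++ pvDevV Y cs (a + 1) l

/-- A's while loop as structural recursion over the remaining motif list -/
def pvIterList (Y : List Int) (domains : List (Int × Int × Int)) (devMax : Int)
    (string : List Char) : List (Int × Int) → List Char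
  | [] => string
  | motif :: rest =>
    let sign := motif.2
    let dPrev := PySem.List.pyGetD domains (motif.1 - 1) (0, 0, 0)
    let dNext := PySem.List.pyGetD domains (motif.1 + 1) (0, 0, 0)
    let newMax := (PySem.List.max? (pvGetDev Y (dPrev.1, dNext.2.1, -sign)) (fun x => x)).getD 0
    if newMax ≤ devMax then
      let newLetter := if sign < 0 then '+' else '-'
      let dCur := PySem.List.pyGetD domains motif.1 (0, 0, 0)
      (PySem.List.pyRange dCur.1 (dCur.2.1 + 1) 1).foldl
        (fun st ind => st.set ind.toNat newLetter) string
    else pvIterList Y domains devMax string rest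

/-- acceptance test exactly as A's loop body computes it, as a function of the index -/
def pvAccA (Y : List Int) (ds : List (Int × Int × Int)) (devMax : Int) (r : Int) : Bool :=
  decide ((PySem.List.max? (pvGetDev Y ((PySem.List.pyGetD ds (r - 1) (0, 0, 0)).1,
    (PySem.List.pyGetD ds (r + 1) (0, 0, 0)).2.1,
    -(PySem.List.pyGetD ds r (0, 0, 0)).2.2)) (fun x => x)).getD 0 ≤ devMax)

/-- the string A's loop produces when it absorbs droplet `r` -/
def pvFlipA (ds : List (Int × Int × Int)) (cs : List Char) (r : Int) : List Char :=
  let sign := (PySem.List.pyGetD ds r (0, 0, 0)).2.2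
  let newLetter := if sign < 0 then '+' else '-'
  let dCur := PySem.List.pyGetD ds r (0, 0, 0)
  (PySem.List.pyRange dCur.1 (dCur.2.1 + 1) 1).foldl
    (fun st ind => st.set ind.toNat newLetter) cs

/-- acceptance test exactly as B's pvStepB computes it -/
def pvAccB (Y : List Int) (cs : List Char) (runs : List (Int × Int)) (devMax : Int)
    (r : Int) : Bool :=
  decide ((PySem.List.max?
    ((PySem.List.pyRange (PySem.List.pyGetD runs (r - 1) (0, 0)).1
        ((PySem.List.pyGetD runs (r + 1) (0, 0)).2 + 1) 1).foldl (fun acc k =>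
      let d := PySem.List.pyGetD Y (k + 1) 0 - PySem.List.pyGetD Y k 0
      if d * pvSgnC (PySem.List.pyGetD cs ((PySem.List.pyGetD runs r (0, 0)).1 - 1) ' ') < 0
      then acc ++ [|d|] else acc) []) (fun x => x)).getD 0 ≤ devMax)

def pvKeyB (runs : List (Int × Int)) (r : Int) : Int :=
  (PySem.List.pyGetD runs r (0, 0)).2 - (PySem.List.pyGetD runs r (0, 0)).1

def pvGB (runs : List (Int × Int)) (r : Int) : (Int × Int) × Int × Int :=
  ((pvKeyB runs r, r), (PySem.List.pyGetD runs r (0, 0)).1, (PySem.List.pyGetD runs r (0, 0)).2)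

/-- abstract min-selection step mirrored by pvStepB -/
def pvSelStep (acc : Int → Bool) (key : Int → Int) (b : Option Int) (r : Int) : Option Int :=
  if acc r then
    match b with
    | none => some r
    | some x => if key r < key x ∨ (key r = key x ∧ r < x) then some r else some x
  else b

def pvSel (acc : Int → Bool) (key : Int → Int) (l : List Int) (b : Option Int) : Option Int :=
  l.foldl (pvSelStep acc key) b

-- small generic lemmas -----------------------------------------------------

lemma pvRange_nonpos {a b : Int} (h : b ≤ a) : PySem.List.pyRange a b 1 = [] := by
  simp [PySem.List.pyRange, show ¬ (a < b) by omega]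

lemma pvRange_pairwise_lt (a b : Int) : (PySem.List.pyRange a b 1).Pairwise (· < ·) := by
  simp only [PySem.List.pyRange]
  norm_num
  rw [List.pairwise_map]
  exact (List.pairwise_lt_range).imp (by intro i j hij; omega)

lemma pvGetD_cons_succ {α : Type} (x : α) (l : List α) (k : Nat) (d : α) :
    PySem.List.pyGetD (x :: l) ((k : Int) + 1) d = PySem.List.pyGetD l (k : Int) d := by
  rw [PySem.List.pyGetD_of_nonneg _ _ (by omega), PySem.List.pyGetD_of_nonneg _ _ (by omega)]
  have h1 : ((k : Int) + 1).toNat = k + 1 := by omega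
  have h2 : ((k : Int)).toNat = k := by omega
  rw [h1, h2, List.getD_cons_succ]

lemma pvGetD_natCast' {α : Type} (l : List α) (k : Nat) (d : α) :
    PySem.List.pyGetD l (k : Int) d = l.getD k d := by
  rw [PySem.List.pyGetD_of_nonneg _ _ (by omega)]
  have h2 : ((k : Int)).toNat = k := by omega
  rw [h2]

-- dev-list lemmas ----------------------------------------------------------

lemma pvDevC_append (Y : List Int) (t : Int) (a l1 l2 : Nat) :
    pvDevC Y t a (l1 + l2) = pvDevC Y t a l1 ++ pvDevC Y t (a + l1) l2 := by
  induction l1 generalizing a with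
  | zero => simp [pvDevC]
  | succ m ih =>
    have h1 : m + 1 + l2 = (m + l2) + 1 := by omega
    have h2 : a + (m + 1) = a + 1 + m := by omega
    rw [h1]
    simp only [pvDevC, ih (a + 1), h2, List.append_assoc]

lemma pvDevV_append (Y : List Int) (cs : List Char) (a l1 l2 : Nat) :
    pvDevV Y cs a (l1 + l2) = pvDevV Y cs a l1 ++ pvDevV Y cs (a + l1) l2 := by
  induction l1 generalizing a with
  | zero => simp [pvDevV]
  | succ m ih =>
    have h1 : m + 1 + l2 = (m + l2) + 1 := by omega
    have h2 : a + (m + 1) = a + 1 + m := by omega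
    rw [h1]
    simp only [pvDevV, ih (a + 1), h2, List.append_assoc]

lemma pvDevC_eq_devV (Y : List Int) (cs : List Char) (t : Int) :
    ∀ (l a : Nat), (∀ k, a ≤ k → k < a + l → pvSgnC (cs.getD k ' ') = t) →
    pvDevC Y t a l = pvDevV Y cs a l := by
  intro l
  induction l with
  | zero => intro a _; rfl
  | succ m ih =>
    intro a h
    have hs : pvSgnC (cs.getD a ' ') = t := h a (le_refl a) (by omega)
    simp only [pvDevC, pvDevV, hs]
    rw [ih (a + 1) (fun k hk1 hk2 => h k (by omega) (by omega))]

lemma pvGetDev_foldl (Y : List Int) (t : Int) :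
    ∀ (l aN : Nat) (acc : List Int),
    (PySem.List.pyRange 0 (l : Int) 1).foldl (fun res i =>
      let d := PySem.List.pyGetD Y ((aN : Int) + i + 1) 0 - PySem.List.pyGetD Y ((aN : Int) + i) 0
      if d * t < 0 then res ++ [|d|] else res) acc = acc ++ pvDevC Y t aN l := by
  intro l
  induction l with
  | zero =>
    intro aN acc
    rw [show ((0 : Nat) : Int) = 0 by simp, pvRange_nonpos (le_refl 0)]
    simp [pvDevC]
  | succ m ih =>
    intro aN acc
    rw [show ((m + 1 : Nat) : Int) = (m : Int) + 1 by push_cast; ring,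
      PySem.List.pyRange_one_succ_right (by omega), List.foldl_append, ih]
    rw [pvDevC_append Y t aN m 1]
    simp only [List.foldl_cons, List.foldl_nil]
    have hc2 : (aN : Int) + (m : Int) + 1 = ((aN + m + 1 : Nat) : Int) := by push_cast; ring
    have hc1 : (aN : Int) + (m : Int) = ((aN + m : Nat) : Int) := by push_cast; ring
    rw [hc2, hc1, pvGetD_natCast', pvGetD_natCast']
    simp only [pvDevC, pvDY, List.append_nil]
    split_ifs with hd <;> simp [List.append_assoc]

lemma pvGetDev_eq_devC (Y : List Int) (t : Int) (aN l : Nat) :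
    pvGetDev Y ((aN : Int), (aN : Int) + (l : Int) - 1, t) = pvDevC Y t aN l := by
  simp only [pvGetDev]
  rw [show ((aN : Int) + (l : Int) - 1) - (aN : Int) + 1 = (l : Int) by ring]
  rw [pvGetDev_foldl Y t l aN []]
  simp

lemma pvScanB_eq_devC (Y : List Int) (t : Int) :
    ∀ (l aN : Nat) (acc : List Int),
    (PySem.List.pyRange (aN : Int) ((aN : Int) + (l : Int)) 1).foldl (fun acc k =>
      let d := PySem.List.pyGetD Y (k + 1) 0 - PySem.List.pyGetD Y k 0
      if d * t < 0 then acc ++ [|d|] else acc) acc = acc ++ pvDevC Y t aN l := by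
  intro l
  induction l with
  | zero =>
    intro aN acc
    rw [show (aN : Int) + ((0 : Nat) : Int) = (aN : Int) by simp, pvRange_nonpos (le_refl _)]
    simp [pvDevC]
  | succ m ih =>
    intro aN acc
    rw [show (aN : Int) + ((m + 1 : Nat) : Int) = ((aN : Int) + (m : Int)) + 1 by push_cast; ring,
      PySem.List.pyRange_one_succ_right (by omega), List.foldl_append]
    rw [ih, pvDevC_append Y t aN m 1]
    simp only [List.foldl_cons, List.foldl_nil]
    rw [show (aN : Int) + (m : Int) + 1 = ((aN + m + 1 : Nat) : Int) by push_cast; ring]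
    rw [show (aN : Int) + (m : Int) = ((aN + m : Nat) : Int) by push_cast; ring]
    rw [pvGetD_natCast', pvGetD_natCast']
    simp only [pvDevC, pvDY, List.append_nil]
    split_ifs with hd <;> simp [List.append_assoc]

lemma pvScanB_eq_devV (Y : List Int) (cs : List Char) :
    ∀ (l : Nat) (acc : List Int),
    (PySem.List.pyRange 0 (l : Int) 1).foldl (fun acc k =>
      let d := PySem.List.pyGetD Y (k + 1) 0 - PySem.List.pyGetD Y k 0
      if d * pvSgnC (PySem.List.pyGetD cs k ' ') < 0 then acc ++ [|d|] else acc) acc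
    = acc ++ pvDevV Y cs 0 l := by
  intro l
  induction l with
  | zero =>
    intro acc
    rw [show ((0 : Nat) : Int) = 0 by simp, pvRange_nonpos (le_refl 0)]
    simp [pvDevV]
  | succ m ih =>
    intro acc
    rw [show ((m + 1 : Nat) : Int) = (m : Int) + 1 by push_cast; ring,
      PySem.List.pyRange_one_succ_right (by omega), List.foldl_append, ih]
    rw [pvDevV_append Y cs 0 m 1]
    simp only [List.foldl_cons, List.foldl_nil]
    rw [show (m : Int) + 1 = ((m + 1 : Nat) : Int) by push_cast; ring]
    rw [pvGetD_natCast', pvGetD_natCast', pvGetD_natCast']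
    simp only [pvDevV, pvDY, Nat.zero_add]
    split_ifs with hd <;> simp

-- boundary-list lemmas -----------------------------------------------------

lemma pvBnd_eq (cs : List Char) (e : Nat) : pvBnd cs e =
    if e < cs.length then
      (if cs.getD e ' ' = cs.getD (e - 1) ' ' then pvBnd cs (e + 1) else e :: pvBnd cs (e + 1))
    else [cs.length] := by
  rw [pvBnd]; split <;> simp_all

lemma pvCharPM {cs : List Char} (hpm : ∀ c ∈ cs, c = '+' ∨ c = '-') {k : Nat}
    (hk : k < cs.length) : cs.getD k ' ' = '+' ∨ cs.getD k ' ' = '-' := by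
  rw [List.getD_eq_getElem cs ' ' hk]
  exact hpm _ (List.getElem_mem hk)

lemma pvTakeSet (c : Char) (p : Nat) (cs : List Char) (h : p < cs.length) :
    (cs.set p c).take (p + 1) = cs.take p ++ [c] := by
  rw [List.set_eq_take_append_cons_drop, if_pos h]
  rw [List.take_append]
  simp [List.length_take, Nat.min_eq_left (Nat.le_of_lt h)]

lemma pvDropSet (c : Char) (p m : Nat) (cs : List Char) (h : p < m) :
    (cs.set p c).drop m = cs.drop m := by
  exact List.drop_set_of_lt h

lemma pvBnd_mem (cs : List Char) : ∀ (e : Nat), e ≤ cs.length → ∀ x ∈ pvBnd cs e,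
    e ≤ x ∧ x ≤ cs.length ∧ (x < cs.length → cs.getD x ' ' ≠ cs.getD (x - 1) ' ') := by
  suffices H : ∀ (k e : Nat), cs.length - e ≤ k → e ≤ cs.length → ∀ x ∈ pvBnd cs e,
      e ≤ x ∧ x ≤ cs.length ∧ (x < cs.length → cs.getD x ' ' ≠ cs.getD (x - 1) ' ') by
    intro e he x hx
    exact H cs.length e (by omega) he x hx
  intro k
  induction k with
  | zero =>
    intro e hke hen x hx
    rw [pvBnd_eq, if_neg (by omega)] at hx
    simp at hx
    subst hx
    exact ⟨by omega, le_refl _, by omega⟩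
  | succ m ih =>
    intro e hke hen x hx
    rw [pvBnd_eq] at hx
    by_cases he : e < cs.length
    · rw [if_pos he] at hx
      by_cases hc : cs.getD e ' ' = cs.getD (e - 1) ' '
      · rw [if_pos hc] at hx
        have := ih (e + 1) (by omega) (by omega) x hx
        exact ⟨by omega, this.2.1, this.2.2⟩
      · rw [if_neg hc] at hx
        rcases List.mem_cons.mp hx with rfl | hx'
        · exact ⟨le_refl _, by omega, fun _ => hc⟩
        · have := ih (e + 1) (by omega) (by omega) x hx'
          exact ⟨by omega, this.2.1, this.2.2⟩
    · rw [if_neg he] at hx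
      simp at hx
      subst hx
      exact ⟨by omega, le_refl _, by omega⟩

lemma pvBnd_pairwise (cs : List Char) : ∀ (e : Nat), (pvBnd cs e).Pairwise (· < ·) := by
  suffices H : ∀ (k e : Nat), cs.length - e ≤ k → (pvBnd cs e).Pairwise (· < ·) by
    intro e; exact H cs.length e (by omega)
  intro k
  induction k with
  | zero =>
    intro e hke
    rw [pvBnd_eq]
    by_cases he : e < cs.length
    · omega
    · rw [if_neg he]; simp
  | succ m ih =>
    intro e hke
    rw [pvBnd_eq]
    by_cases he : e < cs.length
    · rw [if_pos he]
      by_cases hc : cs.getD e ' ' = cs.getD (e - 1) ' '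
      · rw [if_pos hc]; exact ih (e + 1) (by omega)
      · rw [if_neg hc]
        refine List.Pairwise.cons ?_ (ih (e + 1) (by omega))
        intro x hx
        have := pvBnd_mem cs (e + 1) (by omega) x hx
        omega
    · rw [if_neg he]; simp

lemma pvSgn_opp (c d : Char) (hc : c = '+' ∨ c = '-') (hd : d = '+' ∨ d = '-') (hne : c ≠ d) :
    pvSgnC c = -pvSgnC d := by
  rcases hc with rfl | rfl <;> rcases hd with rfl | rfl <;> simp_all [pvSgnC]

set_option maxHeartbeats 1000000 in
lemma pvFindLoop_eq (cs : List Char) (hpm : ∀ c ∈ cs, c = '+' ∨ c = '-') :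
    ∀ (fuel st e : Nat) (acc : List (Int × Int × Int)),
    1 ≤ e → e ≤ cs.length → st < e →
    (∀ k, st ≤ k → k < e → cs.getD k ' ' = cs.getD st ' ') →
    2 * (cs.length - e) + 2 ≤ fuel →
    pvFindLoop cs (cs.getD st ' ') (pvSgnC (cs.getD st ' ')) (st : Int) (e : Int) acc fuel
      = acc ++ pvPairs cs st (pvBnd cs e) := by
  intro fuel
  induction fuel using Nat.strong_induction_on with
  | _ fuel ih =>
  intro st e acc he1 hen hst hconst hfuel
  obtain ⟨f, rfl⟩ : ∃ f, fuel = f + 1 := ⟨fuel - 1, by omega⟩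
  by_cases he : e < cs.length
  · simp only [pvFindLoop]
    rw [if_pos (by exact_mod_cast he)]
    rw [pvGetD_natCast']
    by_cases heq : cs.getD e ' ' = cs.getD st ' '
    · rw [if_pos heq]
      rw [show (e : Int) + 1 = ((e + 1 : Nat) : Int) by push_cast; ring]
      rw [ih f (by omega) st (e + 1) acc (by omega) (by omega) (by omega)
        (fun k hk1 hk2 => by
          rcases Nat.lt_or_ge k e with h | h
          · exact hconst k hk1 h
          · have : k = e := by omega
            subst this; exact heq)
        (by omega)]
      rw [pvBnd_eq cs e, if_pos he,
        if_pos (heq.trans (hconst (e - 1) (by omega) (by omega)).symm)]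
    · rw [if_neg heq]
      have hstn : st < cs.length := by omega
      have hcse : cs.getD e ' ' = '+' ∨ cs.getD e ' ' = '-' := pvCharPM hpm he
      have hcst : cs.getD st ' ' = '+' ∨ cs.getD st ' ' = '-' := pvCharPM hpm hstn
      have hletter : (if -pvSgnC (cs.getD st ' ') = -1 then '-' else '+') = cs.getD e ' ' := by
        rcases hcst with h1 | h1 <;> rcases hcse with h2 | h2
        · exact absurd (h2.trans h1.symm) heq
        · rw [h1, h2]; decide
        · rw [h1, h2]; decide
        · exact absurd (h2.trans h1.symm) heq
      have hsgn : -pvSgnC (cs.getD st ' ') = pvSgnC (cs.getD e ' ') := by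
        rw [pvSgn_opp (cs.getD e ' ') (cs.getD st ' ') hcse hcst (fun h => heq h)]
      obtain ⟨f2, rfl⟩ : ∃ f2, f = f2 + 1 := ⟨f - 1, by omega⟩
      simp only [pvFindLoop]
      rw [if_pos (by exact_mod_cast he)]
      rw [pvGetD_natCast', hletter, if_pos rfl]
      rw [hsgn]
      rw [show (e : Int) + 1 = ((e + 1 : Nat) : Int) by push_cast; ring]
      rw [ih f2 (by omega) e (e + 1) (acc ++ [((st : Int), (e : Int) - 1, pvSgnC (cs.getD st ' '))])
        (by omega) (by omega) (by omega)
        (fun k hk1 hk2 => by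
          have hke : k = e := by omega
          subst hke; rfl) (by omega)]
      rw [pvBnd_eq cs e, if_pos he, if_neg (by
        intro hcon
        exact heq (hcon.trans (hconst (e - 1) (by omega) (by omega))))]
      simp [pvPairs, List.append_assoc]
  · have hEn : e = cs.length := by omega
    simp only [pvFindLoop]
    rw [if_neg (by exact_mod_cast he)]
    subst hEn
    rw [pvBnd_eq cs cs.length, if_neg (by omega)]
    simp [pvPairs]

lemma pvFindDomains_eq (s : String) (hne : s.toList ≠ [])
    (hpm : ∀ c ∈ s.toList, c = '+' ∨ c = '-') :
    pvFindDomains s = pvPairs s.toList 0 (pvBnd s.toList 1) := by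
  have hn : 0 < s.toList.length := List.length_pos_of_ne_nil hne
  have h0 : PySem.List.pyGetD s.toList (0 : Int) ' ' = s.toList.getD 0 ' ' := by
    rw [show (0 : Int) = ((0 : Nat) : Int) by simp, pvGetD_natCast']
  have hsgn : (if s.toList.getD 0 ' ' = '-' then (-1 : Int)
      else if s.toList.getD 0 ' ' = '+' then 1 else 0) = pvSgnC (s.toList.getD 0 ' ') := by
    rcases pvCharPM hpm hn with h | h <;> rw [h] <;> decide
  have key := pvFindLoop_eq s.toList hpm (2 * s.toList.length + 1) 0 1 [] (le_refl 1)
    (by omega) (by omega)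
    (fun k hk1 hk2 => by
      have hk0 : k = 0 := by omega
      subst hk0; rfl) (by omega)
  rw [List.nil_append] at key
  have key2 : pvFindLoop s.toList (s.toList.getD 0 ' ') (pvSgnC (s.toList.getD 0 ' '))
      0 (0 + 1) [] (2 * s.toList.length + 1) = pvPairs s.toList 0 (pvBnd s.toList 1) := by
    exact_mod_cast key
  simp only [pvFindDomains]
  rw [h0, hsgn]
  rw [show 2 * s.toList.length + 2 = (2 * s.toList.length + 1) + 1 by omega]
  rw [pvFindLoop.eq_2]
  rw [if_pos (show (0 : Int) < (s.toList.length : Int) by exact_mod_cast hn)]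
  rw [h0, if_pos rfl]
  exact key2

lemma pvDevSplit (Y : List Int) (cs : List Char) :
    ∀ (e st : Nat), 1 ≤ e → e ≤ cs.length → st < e →
    (∀ k, st ≤ k → k < e → cs.getD k ' ' = cs.getD st ' ') →
    (pvPairs cs st (pvBnd cs e)).flatMap (pvGetDev Y) = pvDevV Y cs st (cs.length - st) := by
  suffices H : ∀ (kk e st : Nat), cs.length - e ≤ kk → 1 ≤ e → e ≤ cs.length → st < e →
      (∀ k, st ≤ k → k < e → cs.getD k ' ' = cs.getD st ' ') →
      (pvPairs cs st (pvBnd cs e)).flatMap (pvGetDev Y) = pvDevV Y cs st (cs.length - st) by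
    intro e st h1 h2 h3 h4; exact H cs.length e st (by omega) h1 h2 h3 h4
  intro kk
  induction kk with
  | zero =>
    intro e st hkk he1 hen hst hconst
    have hEn : e = cs.length := by omega
    subst hEn
    rw [pvBnd_eq, if_neg (by omega)]
    simp only [pvPairs, List.flatMap_cons, List.flatMap_nil, List.append_nil]
    rw [show (cs.length : Int) - 1 = (st : Int) + ((cs.length - st : Nat) : Int) - 1 by push_cast; omega]
    rw [pvGetDev_eq_devC]
    exact pvDevC_eq_devV Y cs _ _ st (fun k hk1 hk2 => by rw [hconst k hk1 (by omega)])
  | succ m ih =>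
    intro e st hkk he1 hen hst hconst
    by_cases he : e < cs.length
    · rw [pvBnd_eq, if_pos he]
      by_cases hc : cs.getD e ' ' = cs.getD (e - 1) ' '
      · rw [if_pos hc]
        exact ih (e + 1) st (by omega) (by omega) (by omega) (by omega)
          (fun k hk1 hk2 => by
            rcases Nat.lt_or_ge k e with h | h
            · exact hconst k hk1 h
            · have hke : k = e := by omega
              calc cs.getD k ' ' = cs.getD e ' ' := by rw [hke]
                _ = cs.getD (e - 1) ' ' := hc
                _ = cs.getD st ' ' := hconst (e - 1) (by omega) (by omega))
      · rw [if_neg hc]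
        simp only [pvPairs, List.flatMap_cons]
        rw [show (e : Int) - 1 = (st : Int) + ((e - st : Nat) : Int) - 1 by push_cast; omega]
        rw [pvGetDev_eq_devC]
        rw [pvDevC_eq_devV Y cs _ _ st (fun k hk1 hk2 => by rw [hconst k hk1 (by omega)])]
        rw [ih (e + 1) e (by omega) (by omega) (by omega) (by omega)
          (fun k hk1 hk2 => by
            have hke : k = e := by omega
            subst hke; rfl)]
        have := pvDevV_append Y cs st (e - st) (cs.length - e)
        rw [show st + (e - st) = e by omega] at this
        rw [show (e - st) + (cs.length - e) = cs.length - st by omega] at this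
        rw [this]
    · have hEn : e = cs.length := by omega
      subst hEn
      rw [pvBnd_eq, if_neg (by omega)]
      simp only [pvPairs, List.flatMap_cons, List.flatMap_nil, List.append_nil]
      rw [show (cs.length : Int) - 1 = (st : Int) + ((cs.length - st : Nat) : Int) - 1 by
        push_cast; omega]
      rw [pvGetDev_eq_devC]
      exact pvDevC_eq_devV Y cs _ _ st (fun k hk1 hk2 => by rw [hconst k hk1 (by omega)])

lemma pvPairs_eq_zipWith (cs : List Char) :
    ∀ (bl : List Nat) (a : Nat), pvPairs cs a bl =
      List.zipWith (fun (x y : Nat) => ((x : Int), (y : Int) - 1, pvSgnC (cs.getD x ' '))) (a :: bl) bl := by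
  intro bl
  induction bl with
  | nil => intro a; simp [pvPairs]
  | cons b rest ih => intro a; simp only [pvPairs, List.zipWith_cons_cons, ih b]

lemma pvPairs_get (cs : List Char) : ∀ (bl : List Nat) (a tt : Nat), tt < bl.length →
    PySem.List.pyGetD (pvPairs cs a bl) ((tt : Nat) : Int) (0, 0, 0)
      = ((((a :: bl).getD tt 0 : Nat) : Int), ((bl.getD tt 0 : Nat) : Int) - 1,
         pvSgnC (cs.getD ((a :: bl).getD tt 0) ' ')) := by
  intro bl
  induction bl with
  | nil => intro a tt h; simp at h
  | cons b rest ih =>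
    intro a tt h
    cases tt with
    | zero =>
      rw [pvGetD_natCast']
      simp [pvPairs]
    | succ u =>
      rw [show ((u + 1 : Nat) : Int) = ((u : Nat) : Int) + 1 by push_cast; ring]
      simp only [pvPairs]
      rw [pvGetD_cons_succ]
      rw [ih b u (by simpa using h)]
      simp

-- write-range lemma --------------------------------------------------------

lemma pvSetRange (c : Char) : ∀ (l p : Nat) (cs : List Char), p + l ≤ cs.length →
    (PySem.List.pyRange (p : Int) ((p : Int) + (l : Int)) 1).foldl
      (fun st ind => st.set ind.toNat c) cs
    = cs.take p ++ List.replicate l c ++ cs.drop (p + l) := by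
  intro l
  induction l with
  | zero =>
    intro p cs hlen
    rw [show (p : Int) + ((0 : Nat) : Int) = (p : Int) by simp, pvRange_nonpos (le_refl _)]
    simp
  | succ m ih =>
    intro p cs hlen
    rw [PySem.List.pyRange_one_cons (by push_cast; omega)]
    simp only [List.foldl_cons]
    rw [show ((p : Int)).toNat = p by omega]
    rw [show (p : Int) + 1 = ((p + 1 : Nat) : Int) by push_cast; ring]
    rw [show (p : Int) + ((m + 1 : Nat) : Int) = ((p + 1 : Nat) : Int) + ((m : Nat) : Int) by push_cast; ring]
    rw [ih (p + 1) (cs.set p c) (by simp; omega)]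
    rw [pvTakeSet c p cs (by omega), pvDropSet c p (p + 1 + m) cs (by omega)]
    rw [show p + 1 + m = p + (m + 1) by omega]
    simp [List.replicate_succ, List.append_assoc]

-- sorting lemmas -----------------------------------------------------------

lemma pvInsertBy_map {α β : Type} (f : α → β) (bef : β → β → Bool) (x : α) :
    ∀ (ys : List α), PySem.List.insertBy bef (f x) (ys.map f)
      = (PySem.List.insertBy (fun a b => bef (f a) (f b)) x ys).map f := by
  intro ys
  induction ys with
  | nil => simp [PySem.List.insertBy]
  | cons y ys ih =>
    by_cases h : bef (f x) (f y) <;> simp [PySem.List.insertBy, h, ih]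

lemma pvFoldlInsertBy_map {α β : Type} (f : α → β) (bef : β → β → Bool) :
    ∀ (xs ys : List α),
    xs.foldl (fun acc x => PySem.List.insertBy bef (f x) acc) (ys.map f)
      = (xs.foldl (fun acc x => PySem.List.insertBy (fun a b => bef (f a) (f b)) x acc) ys).map f := by
  intro xs
  induction xs with
  | nil => intro ys; simp
  | cons x xs ih =>
    intro ys
    simp only [List.foldl_cons, pvInsertBy_map]
    exact ih (PySem.List.insertBy (fun a b => bef (f a) (f b)) x ys)

lemma pvInsertBy_pairwise {α : Type} (R : α → α → Prop) (htrans : ∀ a b c, R a b → R b c → R a c)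
    (bef : α → α → Bool) (idx : α → Int) (x : α) :
    ∀ (ys : List α), ys.Pairwise R → (∀ y ∈ ys, idx y < idx x) →
    (∀ y, bef x y = true → R x y) → (∀ y, bef x y = false → idx y < idx x → R y x) →
    (PySem.List.insertBy bef x ys).Pairwise R := by
  intro ys
  induction ys with
  | nil => intro _ _ _ _; simp [PySem.List.insertBy]
  | cons y ys ih =>
    intro hpw hidx hb1 hb2
    by_cases h : bef x y
    · simp only [PySem.List.insertBy, h, if_true]
      refine List.Pairwise.cons ?_ hpw
      intro z hz
      rcases List.mem_cons.mp hz with rfl | hz'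
      · exact hb1 z h
      · exact htrans x y z (hb1 y h) (List.rel_of_pairwise_cons hpw hz')
    · simp only [PySem.List.insertBy, h, Bool.false_eq_true, if_false]
      refine List.Pairwise.cons ?_ ?_
      · intro z hz
        rcases (PySem.List.mem_insertBy bef x z ys).mp hz with rfl | hz'
        · exact hb2 y (eq_false_of_ne_true h) (hidx y (List.mem_cons_self))
        · exact List.rel_of_pairwise_cons hpw hz'
      · exact ih (List.Pairwise.of_cons hpw) (fun z hz => hidx z (List.mem_cons_of_mem y hz)) hb1 hb2

lemma pvFoldlInsertBy_pairwise {α : Type} (R : α → α → Prop) (htrans : ∀ a b c, R a b → R b c → R a c)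
    (bef : α → α → Bool) (idx : α → Int)
    (hb1 : ∀ x y, bef x y = true → R x y)
    (hb2 : ∀ x y, bef x y = false → idx y < idx x → R y x) :
    ∀ (xs acc : List α), acc.Pairwise R → xs.Pairwise (fun a b => idx a < idx b) →
    (∀ y ∈ acc, ∀ x ∈ xs, idx y < idx x) →
    (xs.foldl (fun acc x => PySem.List.insertBy bef x acc) acc).Pairwise R := by
  intro xs
  induction xs with
  | nil => intro acc hacc _ _; simpa using hacc
  | cons x xs ih =>
    intro acc hacc hxs hmem
    simp only [List.foldl_cons]
    refine ih (PySem.List.insertBy bef x acc) ?_ (List.Pairwise.of_cons hxs) ?_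
    · exact pvInsertBy_pairwise R htrans bef idx x acc hacc
        (fun y hy => hmem y hy x List.mem_cons_self)
        (fun y hy => hb1 x y hy) (fun y hy hlt => hb2 x y hy hlt)
    · intro y hy x' hx'
      rcases (PySem.List.mem_insertBy bef x y acc).mp hy with rfl | hy'
      · exact List.rel_of_pairwise_cons hxs hx'
      · exact hmem y hy' x' (List.mem_cons_of_mem x hx')

-- loop-shape conversion ----------------------------------------------------

lemma pvIterLoop_eq_list (Y : List Int) (dom : List (Int × Int × Int)) (dm : Int) :
    ∀ (ms : List (Int × Int)) (num : Nat) (str : List Char),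
    pvIterLoop Y dom ms dm str num = pvIterList Y dom dm str (ms.drop num) := by
  suffices H : ∀ (k : Nat) (ms : List (Int × Int)) (num : Nat) (str : List Char),
      ms.length - num ≤ k →
      pvIterLoop Y dom ms dm str num = pvIterList Y dom dm str (ms.drop num) by
    intro ms num str
    exact H ms.length ms num str (by omega)
  intro k
  induction k with
  | zero =>
    intro ms num str hk
    rw [pvIterLoop, dif_neg (by omega), List.drop_eq_nil_of_le (by omega)]
    rfl
  | succ m ih =>
    intro ms num str hk
    rw [pvIterLoop]
    by_cases h : num < ms.length
    · rw [dif_pos h, List.drop_eq_getElem_cons h]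
      show _ = pvIterList Y dom dm str (ms[num] :: ms.drop (num + 1))
      simp only [pvIterList]
      split_ifs with hc <;> first
        | rfl
        | exact ih ms (num + 1) str (by omega)
    · rw [dif_neg h, List.drop_eq_nil_of_le (by omega)]
      rfl

lemma pvGetD_map_proj (ds : List (Int × Int × Int)) (i : Int) :
    PySem.List.pyGetD (ds.map (fun d => (d.1, d.2.1))) i (0, 0)
      = ((PySem.List.pyGetD ds i (0, 0, 0)).1, (PySem.List.pyGetD ds i (0, 0, 0)).2.1) := by
  simp only [PySem.List.pyGetD, PySem.List.pyGet?, List.length_map]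
  cases PySem.List.pyIdx? ds.length i with
  | none => rfl
  | some k =>
    simp only [Option.bind_some, List.getElem?_map]
    cases ds[k]? with
    | none => rfl
    | some d => rfl

-- two-pointer run extraction vs boundary list ------------------------------

lemma pvInnerB_bnd (cs : List Char) (c : Char) :
    ∀ (m j : Nat), cs.length - j ≤ m → j < cs.length → cs.getD j ' ' = c →
    ∃ k : Nat, pvInnerB cs c m ((j : Nat) : Int) = ((k : Nat) : Int) ∧ j ≤ k ∧ k < cs.length ∧
      pvBnd cs (j + 1) = (k + 1) :: (if k + 1 < cs.length then pvBnd cs (k + 2) else []) := by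
  intro m
  induction m with
  | zero => intro j hm hj _; omega
  | succ m ih =>
    intro j hj hjn hc
    simp only [pvInnerB]
    split
    · rename_i h
      have hj1 : j + 1 < cs.length := by exact_mod_cast h.1
      have hcj1 : cs.getD (j + 1) ' ' = c := by
        have := h.2
        rw [show ((j : Nat) : Int) + 1 = ((j + 1 : Nat) : Int) by push_cast; ring,
          pvGetD_natCast'] at this
        exact this
      obtain ⟨k, hk, hle, hklen, hbnd⟩ := ih (j + 1) (by omega) hj1 hcj1
      refine ⟨k, ?_, by omega, hklen, ?_⟩
      · rw [show ((j : Nat) : Int) + 1 = ((j + 1 : Nat) : Int) by push_cast; ring]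
        exact hk
      · rw [pvBnd_eq, if_pos hj1,
          if_pos (by simpa using hcj1.trans hc.symm)]
        exact hbnd
    · rename_i h
      refine ⟨j, rfl, le_rfl, hjn, ?_⟩
      by_cases hj1 : j + 1 < cs.length
      · have hne : cs.getD (j + 1) ' ' ≠ c := by
          intro hcon
          exact h ⟨by exact_mod_cast hj1, by
            rw [show ((j : Nat) : Int) + 1 = ((j + 1 : Nat) : Int) by push_cast; ring,
              pvGetD_natCast']
            exact hcon⟩
        rw [pvBnd_eq, if_pos hj1, if_neg (by
          simp only [Nat.add_sub_cancel]
          rw [hc]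
          exact hne), if_pos hj1]
      · rw [pvBnd_eq, if_neg hj1, if_neg hj1]
        have : cs.length = j + 1 := by omega
        rw [this]

lemma pvRunsB_stop (cs : List Char) (i : Int) (h : ¬ i < (cs.length : Int)) :
    ∀ f : Nat, pvRunsB cs f i = [] := by
  intro f
  cases f with
  | zero => rfl
  | succ f => simp only [pvRunsB, if_neg h]

lemma pvRunsB_eq (cs : List Char) :
    ∀ (f i : Nat), cs.length - i < f → i < cs.length →
    pvRunsB cs f ((i : Nat) : Int)
      = (pvPairs cs i (pvBnd cs (i + 1))).map (fun d => (d.1, d.2.1)) := by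
  intro f
  induction f with
  | zero => intro i hf hi; omega
  | succ f ih =>
    intro i hf hi
    simp only [pvRunsB]
    rw [if_pos (by exact_mod_cast hi)]
    rw [pvGetD_natCast']
    obtain ⟨k, hk, hle, hklen, hbnd⟩ :=
      pvInnerB_bnd cs (cs.getD i ' ') cs.length i (by omega) hi rfl
    rw [hk, hbnd]
    simp only [pvPairs, List.map_cons]
    congr 1
    · simp only [Prod.mk.injEq, true_and]
      push_cast
      ring
    · by_cases h2 : k + 1 < cs.length
      · rw [if_pos h2]
        rw [show ((k : Nat) : Int) + 1 = ((k + 1 : Nat) : Int) by push_cast; ring]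
        exact ih (k + 1) (by omega) h2
      · rw [if_neg h2]
        rw [pvRunsB_stop cs _ (by omega) f]
        simp [pvPairs]

-- A's trial loop returns the flip of the first accepted index ---------------

lemma pvIterList_find (Y : List Int) (ds : List (Int × Int × Int)) (devMax : Int)
    (cs : List Char) :
    ∀ L : List Int,
    pvIterList Y ds devMax cs
        (L.map (fun ind => (ind, (PySem.List.pyGetD ds ind (0, 0, 0)).2.2)))
      = match L.find? (pvAccA Y ds devMax) with
        | some r => pvFlipA ds cs r
        | none => cs := by
  intro L
  induction L with
  | nil => rfl
  | cons r L ih =>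
    simp only [List.map_cons, pvIterList]
    cases hacc : pvAccA Y ds devMax r with
    | false =>
      have hcond := of_decide_eq_false hacc
      rw [if_neg hcond, ih, List.find?_cons_of_neg (by simp [hacc])]
    | true =>
      have hcond := of_decide_eq_true hacc
      rw [if_pos hcond, List.find?_cons_of_pos hacc]
      rfl

-- B's selection fold is the abstract min-selection, mapped through pvGB -----

lemma pvFoldB_eq_sel (Y : List Int) (cs : List Char) (runs : List (Int × Int)) (devMax : Int) :
    ∀ (l : List Int) (b : Option Int),
    l.foldl (pvStepB Y cs runs devMax) (b.map (pvGB runs))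
      = (pvSel (pvAccB Y cs runs devMax) (pvKeyB runs) l b).map (pvGB runs) := by
  intro l
  induction l with
  | nil => intro b; rfl
  | cons r l ih =>
    intro b
    have hstep : pvStepB Y cs runs devMax (b.map (pvGB runs)) r
        = (pvSelStep (pvAccB Y cs runs devMax) (pvKeyB runs) b r).map (pvGB runs) := by
      cases hacc : pvAccB Y cs runs devMax r with
      | false =>
        have hcond := of_decide_eq_false hacc
        simp only [pvStepB, pvSelStep, hacc, Bool.false_eq_true, if_false]
        rw [if_neg hcond]
      | true =>
        have hcond := of_decide_eq_true hacc
        simp only [pvStepB, pvSelStep, hacc, if_true]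
        rw [if_pos hcond]
        cases b with
        | none => rfl
        | some x =>
          simp only [Option.map_some]
          have hceq : ((PySem.List.pyGetD runs r (0, 0)).2 - (PySem.List.pyGetD runs r (0, 0)).1
                < (pvGB runs x).1.1 ∨
              ((PySem.List.pyGetD runs r (0, 0)).2 - (PySem.List.pyGetD runs r (0, 0)).1
                = (pvGB runs x).1.1 ∧ r < (pvGB runs x).1.2))
              ↔ (pvKeyB runs r < pvKeyB runs x ∨ (pvKeyB runs r = pvKeyB runs x ∧ r < x)) := by
            simp [pvGB, pvKeyB]
          by_cases hcmp : pvKeyB runs r < pvKeyB runs x ∨ (pvKeyB runs r = pvKeyB runs x ∧ r < x)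
          · rw [if_pos (hceq.mpr hcmp), if_pos hcmp]
            rfl
          · rw [if_neg (fun hh => hcmp (hceq.mp hh)), if_neg hcmp]
            rfl
    simp only [pvSel, List.foldl_cons] at *
    rw [hstep]
    exact ih (pvSelStep (pvAccB Y cs runs devMax) (pvKeyB runs) b r)

lemma pvSel_spec (acc : Int → Bool) (key : Int → Int) :
    ∀ (l : List Int), l.Pairwise (· < ·) →
    ((pvSel acc key l none = none → ∀ r ∈ l, acc r = false) ∧
     (∀ x, pvSel acc key l none = some x → x ∈ l ∧ acc x = true ∧
        ∀ y ∈ l, acc y = true → key x < key y ∨ (key x = key y ∧ x ≤ y))) := by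
  intro l
  induction l using List.reverseRecOn with
  | nil =>
    intro _
    exact ⟨fun _ r hr => absurd hr List.not_mem_nil, fun x hx => by simp [pvSel] at hx⟩
  | append_singleton l r ih =>
    intro hpw
    have hl : l.Pairwise (· < ·) := (List.pairwise_append.mp hpw).1
    have hr : ∀ y ∈ l, y < r := fun y hy =>
      (List.pairwise_append.mp hpw).2.2 y hy r (List.mem_singleton_self _)
    have hsel : pvSel acc key (l ++ [r]) none
        = pvSelStep acc key (pvSel acc key l none) r := by
      simp [pvSel, List.foldl_append]
    obtain ⟨ihN, ihS⟩ := ih hl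
    cases hprev : pvSel acc key l none with
    | none =>
      have hall := ihN hprev
      cases hacc : acc r with
      | false =>
        have hres : pvSel acc key (l ++ [r]) none = none := by
          rw [hsel, hprev]; simp [pvSelStep, hacc]
        constructor
        · intro _ y hy
          rcases List.mem_append.mp hy with hy' | hy'
          · exact hall y hy'
          · rw [List.mem_singleton.mp hy']; exact hacc
        · intro x hx
          rw [hres] at hx
          cases hx
      | true =>
        have hres : pvSel acc key (l ++ [r]) none = some r := by
          rw [hsel, hprev]; simp [pvSelStep, hacc]
        constructor
        · intro h; rw [hres] at h; cases h
        · intro x hx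
          rw [hres] at hx
          injection hx with hx
          subst hx
          refine ⟨List.mem_append.mpr (Or.inr (List.mem_singleton_self _)), hacc, ?_⟩
          intro y hy hacy
          rcases List.mem_append.mp hy with hy' | hy'
          · exact absurd hacy (by simp [hall y hy'])
          · rw [List.mem_singleton.mp hy']
            exact Or.inr ⟨rfl, le_rfl⟩
    | some x =>
      obtain ⟨hxl, haccx, hmin⟩ := ihS x hprev
      have hxr : x < r := hr x hxl
      cases hacc : acc r with
      | false =>
        have hres : pvSel acc key (l ++ [r]) none = some x := by
          rw [hsel, hprev]; simp [pvSelStep, hacc]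
        constructor
        · intro h; rw [hres] at h; cases h
        · intro z hz
          rw [hres] at hz
          injection hz with hz
          subst hz
          refine ⟨List.mem_append.mpr (Or.inl hxl), haccx, ?_⟩
          intro y hy hacy
          rcases List.mem_append.mp hy with hy' | hy'
          · exact hmin y hy' hacy
          · rw [List.mem_singleton.mp hy'] at hacy
            exact absurd hacy (by simp [hacc])
      | true =>
        by_cases hcmp : key r < key x ∨ (key r = key x ∧ r < x)
        · have hres : pvSel acc key (l ++ [r]) none = some r := by
            rw [hsel, hprev]; simp [pvSelStep, hacc, hcmp]
          constructor
          · intro h; rw [hres] at h; cases h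
          · intro z hz
            rw [hres] at hz
            injection hz with hz
            subst hz
            refine ⟨List.mem_append.mpr (Or.inr (List.mem_singleton_self _)), hacc, ?_⟩
            intro y hy hacy
            rcases List.mem_append.mp hy with hy' | hy'
            · have h1 := hmin y hy' hacy
              rcases hcmp with h2 | ⟨h2, h3⟩
              · rcases h1 with h1 | ⟨h1, _⟩
                · exact Or.inl (by omega)
                · exact Or.inl (by omega)
              · omega
            · rw [List.mem_singleton.mp hy']
              exact Or.inr ⟨rfl, le_rfl⟩
        · have hres : pvSel acc key (l ++ [r]) none = some x := by
            rw [hsel, hprev]; simp only [pvSelStep, hacc, if_true]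
            rw [if_neg hcmp]
          constructor
          · intro h; rw [hres] at h; cases h
          · intro z hz
            rw [hres] at hz
            injection hz with hz
            subst hz
            refine ⟨List.mem_append.mpr (Or.inl hxl), haccx, ?_⟩
            intro y hy hacy
            rcases List.mem_append.mp hy with hy' | hy'
            · exact hmin y hy' hacy
            · rw [List.mem_singleton.mp hy']
              rw [not_or] at hcmp
              obtain ⟨hc1, hc2⟩ := hcmp
              rcases Int.lt_or_le (key x) (key r) with h1 | h1
              · exact Or.inl h1
              · exact Or.inr ⟨by omega, by omega⟩

lemma pvFind_spec (p : Int → Bool) (R : Int → Int → Prop) :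
    ∀ (S : List Int), S.Pairwise R →
    ((S.find? p = none → ∀ y ∈ S, p y = false) ∧
     (∀ x, S.find? p = some x → x ∈ S ∧ p x = true ∧
        ∀ y ∈ S, p y = true → x = y ∨ R x y)) := by
  intro S
  induction S with
  | nil =>
    intro _
    exact ⟨fun _ y hy => absurd hy List.not_mem_nil, fun x hx => by simp at hx⟩
  | cons a S ih =>
    intro hpw
    obtain ⟨ihN, ihS⟩ := ih (List.Pairwise.of_cons hpw)
    cases hpa : p a with
    | false =>
      rw [List.find?_cons_of_neg (by simp [hpa])]
      constructor
      · intro hnone y hy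
        rcases List.mem_cons.mp hy with rfl | hy'
        · exact hpa
        · exact ihN hnone y hy'
      · intro x hx
        obtain ⟨hm, hpx, hmin⟩ := ihS x hx
        refine ⟨List.mem_cons_of_mem _ hm, hpx, ?_⟩
        intro y hy hpy
        rcases List.mem_cons.mp hy with rfl | hy'
        · exact absurd hpy (by simp [hpa])
        · exact hmin y hy' hpy
    | true =>
      rw [List.find?_cons_of_pos hpa]
      constructor
      · intro h; cases h
      · intro x hx
        injection hx with hx
        subst hx
        refine ⟨List.mem_cons_self, hpa, ?_⟩
        intro y hy hpy
        rcases List.mem_cons.mp hy with rfl | hy'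
        · exact Or.inl rfl
        · exact Or.inr (List.rel_of_pairwise_cons hpw hy')

-- per-droplet facts: A's and B's acceptance tests agree, and so do the flipped strings
set_option maxHeartbeats 2000000 in
lemma pvIdxFacts (Y : List Int) (cs : List Char) (hpm : ∀ c ∈ cs, c = '+' ∨ c = '-')
    (bl : List Nat)
    (hblmem : ∀ x ∈ bl, 1 ≤ x ∧ x ≤ cs.length ∧
      (x < cs.length → cs.getD x ' ' ≠ cs.getD (x - 1) ' '))
    (hbspw : (0 :: bl).Pairwise (· < ·))
    (devMax : Int) (r : Int) (hr1 : 1 ≤ r) (hr2 : r < (bl.length : Int) - 1) :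
    pvAccA Y (pvPairs cs 0 bl) devMax r
      = pvAccB Y cs ((pvPairs cs 0 bl).map (fun d => (d.1, d.2.1))) devMax r ∧
    String.ofList (pvFlipA (pvPairs cs 0 bl) cs r)
      = String.ofList (PySem.List.slice cs none
          (some (PySem.List.pyGetD ((pvPairs cs 0 bl).map (fun d => (d.1, d.2.1))) r (0, 0)).1) ++
        PySem.List.pyRepeat [if PySem.List.pyGetD cs
            (PySem.List.pyGetD ((pvPairs cs 0 bl).map (fun d => (d.1, d.2.1))) r (0, 0)).1 ' ' = '-'
          then '+' else '-']
          ((PySem.List.pyGetD ((pvPairs cs 0 bl).map (fun d => (d.1, d.2.1))) r (0, 0)).2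
            - (PySem.List.pyGetD ((pvPairs cs 0 bl).map (fun d => (d.1, d.2.1))) r (0, 0)).1 + 1) ++
        PySem.List.slice cs
          (some ((PySem.List.pyGetD ((pvPairs cs 0 bl).map (fun d => (d.1, d.2.1))) r (0, 0)).2 + 1))
          none) := by
  have hmono : ∀ i j : Nat, i < j → j < bl.length + 1 →
      (0 :: bl).getD i 0 < (0 :: bl).getD j 0 := by
    intro i j hij hj
    have hpg := List.pairwise_iff_getElem.mp hbspw i j (by simp; omega) (by simp; omega) hij
    rw [List.getD_eq_getElem _ _ (by simp; omega), List.getD_eq_getElem _ _ (by simp; omega)]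
    exact hpg
  have hgetbl : ∀ j : Nat, j < bl.length → (0 :: bl).getD (j + 1) 0 = bl.getD j 0 := by
    intro j hj; rfl
  have hble : ∀ j : Nat, j < bl.length → bl.getD j 0 ≤ cs.length := by
    intro j hj
    rw [List.getD_eq_getElem _ _ hj]
    exact (hblmem _ (List.getElem_mem hj)).2.1
  have hbchange : ∀ j : Nat, j < bl.length → bl.getD j 0 < cs.length →
      cs.getD (bl.getD j 0) ' ' ≠ cs.getD (bl.getD j 0 - 1) ' ' := by
    intro j hj hlt
    rw [List.getD_eq_getElem _ _ hj] at *
    exact (hblmem _ (List.getElem_mem hj)).2.2 hlt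
  have hrt : ((r.toNat : Nat) : Int) = r := Int.toNat_of_nonneg (by omega)
  set t := r.toNat with htdef
  have ht1 : 1 ≤ t := by omega
  have htlen : t + 1 < bl.length := by omega
  have hgT := pvPairs_get cs bl 0 t (by omega)
  have hgTm := pvPairs_get cs bl 0 (t - 1) (by omega)
  have hgTp := pvPairs_get cs bl 0 (t + 1) (by omega)
  have hP1' : (0 :: bl).getD 0 0 < (0 :: bl).getD t 0 := hmono 0 t (by omega) (by omega)
  have hPQ : (0 :: bl).getD t 0 < bl.getD t 0 := by
    have := hmono t (t + 1) (by omega) (by omega)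
    rwa [hgetbl t (by omega)] at this
  have hAP : (0 :: bl).getD (t - 1) 0 < (0 :: bl).getD t 0 := hmono (t - 1) t (by omega) (by omega)
  have hQB : bl.getD t 0 < bl.getD (t + 1) 0 := by
    have := hmono (t + 1) (t + 2) (by omega) (by omega)
    rwa [hgetbl t (by omega), hgetbl (t + 1) (by omega)] at this
  have hQn : bl.getD t 0 ≤ cs.length := hble t (by omega)
  have hBn : bl.getD (t + 1) 0 ≤ cs.length := hble (t + 1) htlen
  have hPbl : (0 :: bl).getD t 0 = bl.getD (t - 1) 0 := by
    rw [← hgetbl (t - 1) (by omega)]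
    congr 1
    omega
  set P := (0 :: bl).getD t 0 with hPdef
  set Q := bl.getD t 0 with hQdef
  set A := (0 :: bl).getD (t - 1) 0 with hAdef
  set B := bl.getD (t + 1) 0 with hBdef
  have hPn : P < cs.length := by omega
  have hP1 : 1 ≤ P := by simp at hP1'; omega
  have hPchange : cs.getD P ' ' ≠ cs.getD (P - 1) ' ' := by
    rw [hPbl]
    exact hbchange (t - 1) (by omega) (by rw [← hPbl]; exact hPn)
  have hsgn : pvSgnC (cs.getD (P - 1) ' ') = -pvSgnC (cs.getD P ' ') :=
    pvSgn_opp (cs.getD (P - 1) ' ') (cs.getD P ' ')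
      (pvCharPM hpm (by omega)) (pvCharPM hpm hPn) (Ne.symm hPchange)
  simp only [pvAccA, pvAccB, pvFlipA, pvGetD_map_proj]
  rw [show r - 1 = ((t - 1 : Nat) : Int) by omega]
  rw [show r + 1 = ((t + 1 : Nat) : Int) by omega]
  rw [show r = ((t : Nat) : Int) from hrt.symm]
  rw [hgT, hgTm, hgTp]
  dsimp only
  constructor
  · -- acceptance tests agree
    rw [show ((bl.getD (t + 1) 0 : Nat) : Int) - 1
        = ((A : Nat) : Int) + ((B - A : Nat) : Int) - 1 by push_cast; omega]
    rw [pvGetDev_eq_devC]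
    rw [show (((A : Nat) : Int) + ((B - A : Nat) : Int) - 1) + 1
        = ((A : Nat) : Int) + ((B - A : Nat) : Int) by ring]
    rw [show ((P : Nat) : Int) - 1 = ((P - 1 : Nat) : Int) by omega]
    rw [pvGetD_natCast', hsgn]
    rw [pvScanB_eq_devC Y (-pvSgnC (cs.getD P ' ')) (B - A) A []]
    rw [List.nil_append]
  · -- flipped strings agree
    rw [pvGetD_natCast' cs P ' ']
    have hflip : (if pvSgnC (cs.getD P ' ') < 0 then '+' else '-')
        = (if cs.getD P ' ' = '-' then '+' else '-') := by
      rcases pvCharPM hpm hPn with h | h <;> rw [h] <;> decide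
    rw [hflip]
    set c := if cs.getD P ' ' = '-' then '+' else '-' with hcdef
    congr 1
    rw [show ((Q : Nat) : Int) - 1 + 1 = ((P : Nat) : Int) + ((Q - P : Nat) : Int) by
      push_cast; omega]
    rw [pvSetRange c (Q - P) P cs (by omega)]
    rw [PySem.List.slice_to cs (by omega),
      PySem.List.slice_from cs (a := ((P : Nat) : Int) + ((Q - P : Nat) : Int)) (by positivity)]
    rw [PySem.List.pyRepeat_singleton]
    rw [show ((Q : Nat) : Int) - 1 - ((P : Nat) : Int) + 1 = ((Q - P : Nat) : Int) by
      push_cast; omega]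
    rw [show (((P : Nat) : Int)).toNat = P by omega]
    rw [show ((((P : Nat) : Int)) + ((Q - P : Nat) : Int)).toNat = P + (Q - P) by omega]
    rw [show (((Q - P : Nat) : Int)).toNat = Q - P by omega]

-- ===== VERDICT (by name: the statement is the Claim_ definition above) =====
set_option maxHeartbeats 4000000 in
theorem Iter_string2_spec : Claim_equal_Iter_string2 := by
  intro Y s hdom hpre
  obtain ⟨hne, hpmB, hYlen, hdev, hdrop⟩ := hpre
  unfold Spec_Iter_string2
  have hpm : ∀ c ∈ s.toList, c = '+' ∨ c = '-' := by
    intro c hc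
    have := List.all_eq_true.mp hpmB c hc
    simpa using this
  have hn : 0 < s.toList.length := List.length_pos_of_ne_nil hne
  have hblmem := pvBnd_mem s.toList 1 (by omega)
  have hbspw : (0 :: pvBnd s.toList 1).Pairwise (· < ·) :=
    List.Pairwise.cons (fun x hx => by have := hblmem x hx; omega) (pvBnd_pairwise s.toList 1)
  have hlen_ds : (pvPairs s.toList 0 (pvBnd s.toList 1)).length = (pvBnd s.toList 1).length := by
    rw [pvPairs_eq_zipWith]
    simp [List.length_zipWith]
  have hruns : pvRunsB s.toList (s.toList.length + 1) 0
      = (pvPairs s.toList 0 (pvBnd s.toList 1)).map (fun d => (d.1, d.2.1)) := by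
    have := pvRunsB_eq s.toList (s.toList.length + 1) 0 (by omega) hn
    simpa using this
  simp only [Iter_string2, Iter_string2_alt]
  rw [pvFindDomains_eq s hne hpm]
  -- A: motif list as a map, dev list as the one-pass scan
  rw [PySem.List.foldl_append_singleton_eq_map
    (f := fun ind => (ind, (PySem.List.pyGetD (pvPairs s.toList 0 (pvBnd s.toList 1)) ind (0, 0, 0)).2.2))]
  rw [List.nil_append]
  rw [PySem.List.foldl_append_eq_flatMap (g := fun d => pvGetDev Y d)]
  rw [List.nil_append]
  rw [pvDevSplit Y s.toList 1 0 (le_refl 1) (by omega) (by omega)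
    (fun k hk1 hk2 => congrArg (fun i => s.toList.getD i ' ') (by omega : k = 0))]
  rw [Nat.sub_zero]
  -- B: runs and the one-pass devMax scan
  rw [hruns]
  rw [pvScanB_eq_devV Y s.toList s.toList.length []]
  rw [List.nil_append]
  rw [List.length_map]
  rw [hlen_ds]
  -- names for the shared pieces
  set cs := s.toList with hcs
  set bl := pvBnd s.toList 1 with hbl
  set ds := pvPairs cs 0 bl with hds
  set runs := ds.map (fun d => (d.1, d.2.1)) with hrunsdef
  set dm := (PySem.List.max? (pvDevV Y cs 0 cs.length) (fun x => x)).getD 0 with hdm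
  set inds := PySem.List.pyRange 1 ((bl.length : Int) - 1) 1 with hinds
  set fA := fun ind : Int => (ind, (PySem.List.pyGetD ds ind (0, 0, 0)).2.2) with hfA
  set keyA := fun el : Int × Int => (PySem.List.pyGetD ds el.1 (0, 0, 0)).2.1
    - (PySem.List.pyGetD ds el.1 (0, 0, 0)).1 + 1 with hkeyA
  -- A's stable sort of the motif pairs = (an insertBy fold over the indices).map fA
  rw [PySem.List.sorted_eq_foldl_insertBy, List.foldl_map]
  rw [show ([] : List (Int × Int)) = (([] : List Int).map fA) from rfl]
  rw [pvFoldlInsertBy_map fA (fun a b => decide (keyA a < keyA b)) inds []]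
  set S := inds.foldl
    (fun acc x => PySem.List.insertBy (fun a b => decide (keyA (fA a) < keyA (fA b))) x acc) []
    with hS
  -- A's while loop = find? over the sorted index list
  rw [pvIterLoop_eq_list Y ds dm _ 0 cs, List.drop_zero]
  rw [pvIterList_find Y ds dm cs S]
  -- B's fold = abstract min-selection
  rw [show (none : Option ((Int × Int) × Int × Int)) = (none : Option Int).map (pvGB runs) from rfl]
  rw [pvFoldB_eq_sel Y cs runs dm inds none]
  -- order facts
  set KA := fun z : Int => keyA (fA z) with hKA
  set R := fun a b : Int => KA a < KA b ∨ (KA a = KA b ∧ a < b) with hR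
  have htrans : ∀ a b c : Int, R a b → R b c → R a c := by
    intro a b c h1 h2
    rcases h1 with h1 | ⟨h1e, h1l⟩ <;> rcases h2 with h2 | ⟨h2e, h2l⟩ <;>
      simp only [hR] <;> omega
  have hpwS : S.Pairwise R := by
    refine pvFoldlInsertBy_pairwise R htrans _ (fun z => z) ?_ ?_ inds [] List.Pairwise.nil
      (pvRange_pairwise_lt 1 _) (by simp)
    · intro x y h
      exact Or.inl (of_decide_eq_true h)
    · intro x y h hlt
      have hnot : ¬ KA x < KA y := of_decide_eq_false h
      by_cases hq : KA y < KA x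
      · exact Or.inl hq
      · exact Or.inr ⟨by omega, hlt⟩
  have hperm : S.Perm inds := by
    have h1 : S = PySem.List.sorted inds (fun z => KA z) false := by
      rw [PySem.List.sorted_eq_foldl_insertBy]
    rw [h1]
    exact PySem.List.sorted_perm inds (fun z => KA z) false
  have hmemI : ∀ z ∈ inds, 1 ≤ z ∧ z < (bl.length : Int) - 1 := by
    intro z hz
    have := PySem.List.mem_pyRange_one.mp hz
    omega
  have hfacts : ∀ z ∈ inds,
      pvAccA Y ds dm z = pvAccB Y cs runs dm z ∧
      String.ofList (pvFlipA ds cs z)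
        = String.ofList (PySem.List.slice cs none (some (PySem.List.pyGetD runs z (0, 0)).1) ++
            PySem.List.pyRepeat
              [if PySem.List.pyGetD cs (PySem.List.pyGetD runs z (0, 0)).1 ' ' = '-'
               then '+' else '-']
              ((PySem.List.pyGetD runs z (0, 0)).2 - (PySem.List.pyGetD runs z (0, 0)).1 + 1) ++
            PySem.List.slice cs (some ((PySem.List.pyGetD runs z (0, 0)).2 + 1)) none) := by
    intro z hz
    obtain ⟨h1, h2⟩ := hmemI z hz
    exact pvIdxFacts Y cs hpm bl hblmem hbspw dm z h1 h2
  have hKeq : ∀ z : Int, pvKeyB runs z = KA z - 1 := by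
    intro z
    simp only [pvKeyB, hrunsdef, pvGetD_map_proj, hKA, hkeyA, hfA]
    ring
  obtain ⟨hFN, hFS⟩ := pvFind_spec (pvAccA Y ds dm) R S hpwS
  obtain ⟨hSN, hSS⟩ := pvSel_spec (pvAccB Y cs runs dm) (pvKeyB runs) inds
    (pvRange_pairwise_lt 1 _)
  cases hA : S.find? (pvAccA Y ds dm) with
  | none =>
    cases hB : pvSel (pvAccB Y cs runs dm) (pvKeyB runs) inds none with
    | none =>
      simp only [Option.map_none]
      rw [hcs, String.ofList_toList]
    | some y =>
      obtain ⟨hyI, haccy, _⟩ := hSS y hB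
      have := hFN hA y (hperm.mem_iff.mpr hyI)
      rw [(hfacts y hyI).1] at this
      rw [this] at haccy
      cases haccy
  | some x =>
    have hxI : x ∈ inds := hperm.mem_iff.mp (hFS x hA).1
    cases hB : pvSel (pvAccB Y cs runs dm) (pvKeyB runs) inds none with
    | none =>
      have h1 := (hFS x hA).2.1
      rw [(hfacts x hxI).1] at h1
      have := hSN hB x hxI
      rw [this] at h1
      cases h1
    | some y =>
      obtain ⟨hxS, haccx, hminx⟩ := hFS x hA
      obtain ⟨hyI, haccy, hminy⟩ := hSS y hB
      have hyS : y ∈ S := hperm.mem_iff.mpr hyI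
      have hxy : x = y := by
        by_contra hne'
        have h1 := hminx y hyS (by rw [(hfacts y hyI).1]; exact haccy)
        have h2 := hminy x hxI (by rw [← (hfacts x hxI).1]; exact haccx)
        have e1 := hKeq x
        have e2 := hKeq y
        rcases h1 with rfl | h1
        · exact hne' rfl
        · rcases h1 with h1 | ⟨h1e, h1l⟩ <;> rcases h2 with h2 | ⟨h2e, h2l⟩ <;> omega
      subst hxy
      simp only [Option.map_some]
      exact (hfacts x hxI).2
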